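-- pv_equiv track=rewrite | github.com/PMCC-BioinformaticsCore/janis-core | janis_core/translations/nextflow/unwrap.py | group_quoted_strings_in_list
-- ===== SOURCE A (Python) =====
-- def group_quoted_strings_in_list(the_list: list[str]) -> list[str]:
--     groups: list[str] = []
--     current_group: list[str] = []
--
--     for word in the_list:
--         if word != '':
--             if word.startswith('"') and word.endswith('"'):
--                 current_group.append(word.strip('"'))
--             else:
--                 if len(current_group) > 0:
--                     groups.append(f"\"{''.join(current_group)}\"")
--                 groups.append(word)
--                 current_group = []
--
--     # still words in current_group by time we reach end of list
--     if len(current_group) > 0: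
--         groups.append(f"\"{''.join(current_group)}\"")
--
--     return groups
-- ===== SOURCE B (Python) =====
-- from itertools import groupby
--
--
-- def _is_quoted(word: str) -> bool:
--     return word.startswith('"') and word.endswith('"')
--
--
-- def group_quoted_strings_in_list(the_list: list[str]) -> list[str]:
--     words = [w for w in the_list if w != '']
--     out: list[str] = []
--     for quoted, run in groupby(words, key=_is_quoted):
--         if quoted:
--             out.append('"' + ''.join(w.strip('"') for w in run) + '"')
--         else:
--             out.extend(run)
--     return out
-- ===== Notes on version B (the rewrite author's own statement) =====
-- stated objective: alternative
-- what changed: A threads a mutable current_group accumulator through one stateful loop with flush points; B first filters out '' entries, then splits the list into maximal runs with groupby keyed on is_quoted and emits each quoted run as one joined quoted string and each unquoted run verbatim.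
import Mathlib
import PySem

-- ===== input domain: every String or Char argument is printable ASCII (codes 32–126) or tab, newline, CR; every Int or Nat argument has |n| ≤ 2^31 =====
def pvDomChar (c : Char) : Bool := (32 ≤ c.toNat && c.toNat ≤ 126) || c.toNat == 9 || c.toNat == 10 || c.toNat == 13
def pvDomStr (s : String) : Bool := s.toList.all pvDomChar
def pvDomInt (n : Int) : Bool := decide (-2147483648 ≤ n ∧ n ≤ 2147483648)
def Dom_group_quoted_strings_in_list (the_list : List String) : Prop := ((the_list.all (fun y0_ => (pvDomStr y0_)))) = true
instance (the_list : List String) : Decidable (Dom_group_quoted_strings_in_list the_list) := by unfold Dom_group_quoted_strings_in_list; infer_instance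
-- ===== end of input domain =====

-- B replaces A's stateful current_group loop by filter-then-groupby over the is_quoted key (alternative decomposition, same cost).

-- shared primitive helpers (used by both ports)
def pvQuoted (w : String) : Bool := PySem.Str.startswith w "\"" && PySem.Str.endswith w "\""
def pvStripQ (w : String) : String := PySem.Str.stripChars w "\""
-- f"\"{''.join(cs)}\""
def pvQWrap (cs : List String) : String := "\"" ++ PySem.Str.join "" cs ++ "\""

-- ===== PORT A =====
-- A's loop body (one iteration over state (groups, current_group))
def pvStepA (st : List String × List String) (word : String) : List String × List String :=
  if word ≠ "" then
    if pvQuoted word then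
      (st.1, st.2 ++ [pvStripQ word])
    else
      ((if 0 < st.2.length then st.1 ++ [pvQWrap st.2] else st.1) ++ [word], [])
  else st

def group_quoted_strings_in_list (the_list : List String) : List String :=
  let st := the_list.foldl pvStepA ([], [])
  if 0 < st.2.length then st.1 ++ [pvQWrap st.2] else st.1

-- ===== PORT B =====
-- itertools.groupby keyed on pvQuoted: maximal runs with equal key
def pvGroupBy : List String → List (Bool × List String)
  | [] => []
  | w :: ws =>
    (pvQuoted w, w :: ws.takeWhile (fun x => pvQuoted x == pvQuoted w)) ::
      pvGroupBy (ws.dropWhile (fun x => pvQuoted x == pvQuoted w))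
  termination_by l => l.length
  decreasing_by
    simp only [List.length_cons]
    exact Nat.lt_succ_of_le (List.length_dropWhile_le _ _)

def group_quoted_strings_in_list_alt (the_list : List String) : List String :=
  (pvGroupBy (the_list.filter (fun w => w ≠ ""))).foldl
    (fun out g =>
      if g.1 then out ++ [pvQWrap (g.2.map pvStripQ)]
      else out ++ g.2)
    []

-- ===== PRECONDITION & SPEC =====
def Spec_group_quoted_strings_in_list (the_list : List String) (out : List String) : Prop := out = group_quoted_strings_in_list_alt the_list
instance (the_list : List String) (out : List String) : Decidable (Spec_group_quoted_strings_in_list the_list out) := by unfold Spec_group_quoted_strings_in_list; infer_instance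

-- ===== CLAIM (what is proved, stated in full; the proofs are below) =====
def Claim_equal_group_quoted_strings_in_list : Prop := ∀ (the_list : List String), Dom_group_quoted_strings_in_list the_list → Spec_group_quoted_strings_in_list the_list (group_quoted_strings_in_list the_list)

-- ===== LEMMAS AND PROOFS =====

-- flush of A's pending current_group
def pvFlush (c : List String) : List String := if 0 < c.length then [pvQWrap c] else []

-- A's remaining computation from pending group c over the rest of the input
def pvRunC (c : List String) : List String → List String
  | [] => pvFlush c
  | w :: ws =>
    if w = "" then pvRunC c ws
    else if pvQuoted w then pvRunC (c ++ [pvStripQ w]) ws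
    else pvFlush c ++ w :: pvRunC [] ws

-- same, on an ''-free list
def pvRunF (c : List String) : List String → List String
  | [] => pvFlush c
  | w :: ws =>
    if pvQuoted w then pvRunF (c ++ [pvStripQ w]) ws
    else pvFlush c ++ w :: pvRunF [] ws

def pvFlat : List (Bool × List String) → List String
  | [] => []
  | g :: gs => (if g.1 then [pvQWrap (g.2.map pvStripQ)] else g.2) ++ pvFlat gs

theorem pvA_loop (l : List String) (g c : List String) :
    (let st := l.foldl pvStepA (g, c)
     if 0 < st.2.length then st.1 ++ [pvQWrap st.2] else st.1) = g ++ pvRunC c l := by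
  induction l generalizing g c with
  | nil =>
    simp only [List.foldl_nil, pvRunC, pvFlush]
    split <;> simp
  | cons w ws ih =>
    simp only [List.foldl_cons, pvRunC]
    by_cases hw : w = ""
    · rw [show pvStepA (g, c) w = (g, c) by simp [pvStepA, hw]]
      simp [hw, ih]
    · by_cases hq : pvQuoted w
      · rw [show pvStepA (g, c) w = (g, c ++ [pvStripQ w]) by simp [pvStepA, hw, hq]]
        simp [hw, hq, ih]
      · rw [show pvStepA (g, c) w =
            ((if 0 < c.length then g ++ [pvQWrap c] else g) ++ [w], []) by
          simp [pvStepA, hw, hq]]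
        rw [ih]
        simp only [pvFlush]
        split <;> simp

theorem pvRunC_filter (l : List String) (c : List String) :
    pvRunC c l = pvRunF c (l.filter (fun w => w ≠ "")) := by
  induction l generalizing c with
  | nil => simp [pvRunC, pvRunF]
  | cons w ws ih =>
    by_cases hw : w = ""
    · simp [pvRunC, hw, ih]
    · by_cases hq : pvQuoted w <;> simp [pvRunC, pvRunF, hw, hq, ih]


theorem pvFoldl_flat (gs : List (Bool × List String)) (out : List String) :
    gs.foldl
      (fun out g =>
        if g.1 then out ++ [pvQWrap (g.2.map pvStripQ)]
        else out ++ g.2) out = out ++ pvFlat gs := by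
  induction gs generalizing out with
  | nil => simp [pvFlat]
  | cons g gs ih =>
    simp only [List.foldl_cons, pvFlat, ih]
    split <;> simp

-- S2: a nonempty pending group absorbs the maximal quoted run at the front
theorem pvRunF_pending (l : List String) (c : List String) (hc : c ≠ []) :
    pvRunF c l = pvQWrap (c ++ (l.takeWhile pvQuoted).map pvStripQ) ::
      pvRunF [] (l.dropWhile pvQuoted) := by
  induction l generalizing c with
  | nil =>
    simp [pvRunF, pvFlush, List.length_pos_iff.mpr hc]
  | cons w ws ih =>
    by_cases hq : pvQuoted w
    · simp only [pvRunF, hq, if_true, List.takeWhile_cons, List.dropWhile_cons]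
      rw [ih (c ++ [pvStripQ w]) (by simp)]
      simp
    · simp only [pvRunF, hq, List.takeWhile_cons, List.dropWhile_cons,
        Bool.false_eq_true, ite_false]
      simp [pvFlush, List.length_pos_iff.mpr hc]

-- S3: unquoted words are passed through verbatim
theorem pvRunF_unquoted (u l : List String) (hu : ∀ w ∈ u, pvQuoted w = false) :
    pvRunF [] (u ++ l) = u ++ pvRunF [] l := by
  induction u with
  | nil => simp
  | cons w u ih =>
    have hw : pvQuoted w = false := hu w (by simp)
    simp only [List.cons_append, pvRunF, hw, Bool.false_eq_true, ite_false, pvFlush]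
    simp [ih (fun x hx => hu x (by simp [hx]))]

-- S1: A's residual computation equals B's flattened groups
theorem pvRunF_groups_aux : ∀ n (l : List String), l.length ≤ n →
    pvRunF [] l = pvFlat (pvGroupBy l) := by
  intro n
  induction n with
  | zero =>
    intro l hl
    have : l = [] := List.eq_nil_of_length_eq_zero (Nat.le_zero.mp hl)
    simp [this, pvRunF, pvGroupBy, pvFlat, pvFlush]
  | succ n ih =>
    intro l hl
    match l with
    | [] => simp [pvRunF, pvGroupBy, pvFlat, pvFlush]
    | w :: ws =>
      have hlen : (ws.dropWhile (fun x => pvQuoted x == pvQuoted w)).length ≤ n := by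
        have h1 := List.length_dropWhile_le (fun x => pvQuoted x == pvQuoted w) ws
        simp only [List.length_cons] at hl
        omega
      rw [pvGroupBy]
      by_cases hq : pvQuoted w
      · -- quoted run: pending-group lemma
        have heq : (fun x => pvQuoted x == pvQuoted w) = (fun x => pvQuoted x) := by
          funext x; rw [hq]; cases pvQuoted x <;> simp
        rw [heq] at hlen ⊢
        rw [pvRunF]
        simp only [hq, if_true, List.nil_append]
        rw [pvRunF_pending ws [pvStripQ w] (by simp)]
        rw [pvFlat]
        simp only [if_true]
        rw [ih _ hlen]
        simp
      · -- unquoted run: pass-through lemma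
        have hq' : pvQuoted w = false := by simpa using hq
        have habs : ∀ x ∈ w :: ws.takeWhile (fun x => pvQuoted x == pvQuoted w),
            pvQuoted x = false := by
          intro x hx
          rcases List.mem_cons.mp hx with h | h
          · simp [h, hq']
          · have := List.mem_takeWhile_imp h
            rw [hq'] at this
            simpa using this
        have hsplit : w :: ws =
            (w :: ws.takeWhile (fun x => pvQuoted x == pvQuoted w)) ++
              ws.dropWhile (fun x => pvQuoted x == pvQuoted w) := by
          simp [List.takeWhile_append_dropWhile]
        rw [hsplit, pvRunF_unquoted _ _ habs, pvFlat]
        simp only [hq', Bool.false_eq_true, ite_false]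
        rw [hq'] at hlen
        rw [ih _ hlen]

-- ===== VERDICT (by name: the statement is the Claim_ definition above) =====
theorem group_quoted_strings_in_list_spec : Claim_equal_group_quoted_strings_in_list := by
  intro l _
  unfold Spec_group_quoted_strings_in_list group_quoted_strings_in_list group_quoted_strings_in_list_alt
  rw [pvA_loop l [] [], pvRunC_filter, pvFoldl_flat,
    pvRunF_groups_aux (l.filter (fun w => w ≠ "")).length _ le_rfl]
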